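-- pv_equiv track=rewrite | github.com/shayjin/shayjin.github.io | generate_html.py | group_by_occupation
-- ===== SOURCE A (Python) =====
-- def group_by_occupation(counts, occupation_map):
--     """Group name counts by occupation"""
--     occ_groups = {}
--     for name, count in counts:
--         occ = occupation_map.get(name, "Unknown")
--         if occ not in occ_groups:
--             occ_groups[occ] = []
--         occ_groups[occ].append((name, count))
--     return occ_groups
-- ===== SOURCE B (Python) =====
-- def group_by_occupation(counts, occupation_map):
--     """Group name counts by occupation"""
--     # Pass 1: distinct occupations in first-seen order; Pass 2: filter per occupation.
--     occs = []
--     seen = set()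
--     for name, _ in counts:
--         occ = occupation_map.get(name, "Unknown")
--         if occ not in seen:
--             seen.add(occ)
--             occs.append(occ)
--     return {occ: [(n, c) for n, c in counts
--                   if occupation_map.get(n, "Unknown") == occ]
--             for occ in occs}
-- ===== Notes on version B (the rewrite author's own statement) =====
-- stated objective: alternative
-- what changed: Replaces the single-pass dict accumulation with a two-pass scheme: first collect the distinct occupations in first-seen order, then build each group by filtering the counts list per occupation.
import Mathlib
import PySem

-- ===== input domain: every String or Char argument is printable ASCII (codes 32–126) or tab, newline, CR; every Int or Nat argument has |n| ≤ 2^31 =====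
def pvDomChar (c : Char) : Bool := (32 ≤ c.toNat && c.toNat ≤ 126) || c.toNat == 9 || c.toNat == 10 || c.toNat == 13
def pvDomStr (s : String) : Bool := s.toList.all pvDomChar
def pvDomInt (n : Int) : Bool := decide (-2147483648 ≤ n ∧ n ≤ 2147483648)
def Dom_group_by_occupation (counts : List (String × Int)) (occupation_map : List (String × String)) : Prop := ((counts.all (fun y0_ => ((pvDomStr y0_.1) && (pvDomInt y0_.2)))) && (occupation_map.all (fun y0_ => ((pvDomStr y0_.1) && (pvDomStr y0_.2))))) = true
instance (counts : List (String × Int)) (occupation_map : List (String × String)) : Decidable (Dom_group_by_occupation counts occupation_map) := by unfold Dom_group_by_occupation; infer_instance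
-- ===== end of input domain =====

-- B differs from A by a two-pass decomposition (distinct occupations first, then one filter
-- per occupation) instead of a single-pass dict accumulation; same results, no speed claim.

-- ===== PORT A =====
-- single pass: a dict occ -> group, appending each (name, count) to its occupation's list
def group_by_occupation (counts : List (String × Int)) (occupation_map : List (String × String)) : List (String × List (String × Int)) :=
  let m := PySem.Dict.ofList occupation_map
  let occ_groups := counts.foldl (fun d p =>
    let occ := m.getD p.1 "Unknown"
    let d := if d.contains occ then d else d.insert occ ([] : List (String × Int))
    d.modify occ [] (· ++ [p])) PySem.Dict.empty
  occ_groups.items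

-- ===== PORT B =====
-- pass 1: distinct occupations in first-seen order; pass 2: one filter of counts per occupation
def group_by_occupation_alt (counts : List (String × Int)) (occupation_map : List (String × String)) : List (String × List (String × Int)) :=
  let m := PySem.Dict.ofList occupation_map
  let occs : PySem.Set String := PySem.Set.ofList (counts.map (fun p => m.getD p.1 "Unknown"))
  occs.map (fun occ => (occ, counts.filter (fun p => m.getD p.1 "Unknown" == occ)))

-- ===== PRECONDITION & SPEC =====
def Spec_group_by_occupation (counts : List (String × Int)) (occupation_map : List (String × String)) (out : List (String × List (String × Int))) : Prop := out = group_by_occupation_alt counts occupation_map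
instance (counts : List (String × Int)) (occupation_map : List (String × String)) (out : List (String × List (String × Int))) : Decidable (Spec_group_by_occupation counts occupation_map out) := by unfold Spec_group_by_occupation; infer_instance

-- ===== CLAIM (what is proved, stated in full; the proofs are below) =====
def Claim_equal_group_by_occupation : Prop := ∀ (counts : List (String × Int)) (occupation_map : List (String × String)), Dom_group_by_occupation counts occupation_map → Spec_group_by_occupation counts occupation_map (group_by_occupation counts occupation_map)

-- ===== LEMMAS AND PROOFS =====

-- A's step ("if absent insert []; then append") is the step of a plain modify-append loop
lemma stepA_eq_modify (d : PySem.Dict String (List (String × Int))) (occ : String)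
    (p : String × Int) :
    (if d.contains occ then d else d.insert occ ([] : List (String × Int))).modify occ []
        (· ++ [p]) = d.modify occ [] (· ++ [p]) := by
  by_cases h : d.contains occ = true
  · simp [h]
  · simp only [Bool.not_eq_true] at h
    rw [if_neg (by simp [h])]
    unfold PySem.Dict.modify
    rw [PySem.Dict.getD_insert_self, PySem.Dict.insert_insert_self,
        PySem.Dict.getD_of_not_contains d _ h]

theorem group_by_occupation_spec : Claim_equal_group_by_occupation := by
  intro counts occupation_map _
  unfold Spec_group_by_occupation
  simp only [group_by_occupation, group_by_occupation_alt]
  set m := PySem.Dict.ofList occupation_map with hm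
  set key : (String × Int) → String := fun p => m.getD p.1 "Unknown" with hkey
  -- rewrite A's loop as a plain modify-append fold
  have hstep : counts.foldl (fun d p =>
      let occ := m.getD p.1 "Unknown"
      let d' := if d.contains occ then d else d.insert occ ([] : List (String × Int))
      d'.modify occ [] (· ++ [p])) PySem.Dict.empty
      = counts.foldl (fun d p => d.modify (key p) [] (· ++ [p])) PySem.Dict.empty := by
    apply PySem.List.foldl_congr_mem
    intro d p _
    exact stepA_eq_modify d (key p) p
  rw [hstep]
  set F := counts.foldl (fun d p => d.modify (key p) [] (· ++ [p])) PySem.Dict.empty with hF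
  have hnd : F.keys.Nodup := by
    exact PySem.Dict.nodup_keys_foldl_modify_key counts key [] (fun _ p => (· ++ [p]))
      PySem.Dict.empty PySem.Dict.nodup_keys_empty
  have hkeys : F.keys = PySem.Set.ofList (counts.map key) := by
    rw [hF, PySem.Dict.keys_foldl_modify_key, PySem.Dict.keys_empty,
      PySem.Set.update_nil_left]
  have hgetD : ∀ c, F.getD c [] = counts.filter (fun p => key p == c) := by
    intro c
    have hmap : F = (counts.map (fun p => (key p, p))).foldl
        (fun d q => d.modify q.1 [] (· ++ [q.2])) PySem.Dict.empty := by
      rw [hF, List.foldl_map]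
    rw [hmap, PySem.Dict.getD_foldl_modify_append, PySem.Dict.getD_empty]
    simp [List.filter_map, Function.comp_def]
  rw [PySem.Dict.items_eq_map_keys F hnd [], hkeys]
  apply List.map_congr_left
  intro c _
  rw [hgetD c]
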